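-- pv_equiv track=rewrite | github.com/Tech-Meet-10-IITB-Solutions/SuryaDrishti | n_sigma.py | orbit_start_indices
-- ===== SOURCE A (Python) =====
-- def orbit_start_indices(time, step=1):
--     output_arr = []
--     length_arr = []
--     for i in range(len(time)):
--         if(i==0):
--             output_arr.append(i)
--         elif(time[i]-time[i-1]>step):
--             length_arr.append(time[i-1]-time[output_arr[-1]])
--             output_arr.append(i)
--     return output_arr, length_arr
-- ===== SOURCE B (Python) =====
-- def orbit_start_indices(time, step=1):
--     # Pass 1: orbit start indices only.
--     starts = [0] if time else []
--     starts += [i for i in range(1, len(time)) if time[i] - time[i - 1] > step]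
--     # Pass 2: lengths derived from the start list.
--     lengths = [time[starts[j + 1] - 1] - time[starts[j]] for j in range(len(starts) - 1)]
--     return starts, lengths
-- ===== Notes on version B (the rewrite author's own statement) =====
-- stated objective: alternative
-- what changed: B separates the computation into two passes: one scan that collects only the orbit start indices, then a comprehension over consecutive pairs of that start list to derive the lengths, instead of A's single loop that interleaves start detection with length bookkeeping via output_arr[-1].
import Mathlib
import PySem

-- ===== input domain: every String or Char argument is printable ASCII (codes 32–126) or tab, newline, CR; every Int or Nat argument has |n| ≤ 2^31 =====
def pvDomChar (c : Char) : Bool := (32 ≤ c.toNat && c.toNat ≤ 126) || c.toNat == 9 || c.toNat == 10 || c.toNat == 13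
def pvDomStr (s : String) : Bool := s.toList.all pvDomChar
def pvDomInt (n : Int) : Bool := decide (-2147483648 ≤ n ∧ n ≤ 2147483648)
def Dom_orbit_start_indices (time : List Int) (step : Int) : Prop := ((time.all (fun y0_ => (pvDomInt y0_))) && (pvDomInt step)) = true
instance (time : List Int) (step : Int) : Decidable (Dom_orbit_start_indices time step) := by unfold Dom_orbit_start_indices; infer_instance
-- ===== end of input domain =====

-- B splits A's single interleaved loop into two passes: collect start indices, then derive lengths
-- from consecutive starts; objective: alternative decomposition, same cost.


-- ===== PORT A =====
-- every list index A takes is in range, so pyGetD's default is never read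
def orbit_start_indices (time : List Int) (step : Int) : List Int × List Int :=
  (PySem.List.pyRange 0 (time.length : Int) 1).foldl
    (fun (st : List Int × List Int) (i : Int) =>
      if i = 0 then (st.1 ++ [i], st.2)
      else if PySem.List.pyGetD time i 0 - PySem.List.pyGetD time (i - 1) 0 > step then
        (st.1 ++ [i],
         st.2 ++ [PySem.List.pyGetD time (i - 1) 0 -
                  PySem.List.pyGetD time (PySem.List.pyGetD st.1 (-1) 0) 0])
      else st)
    ([], [])

-- ===== PORT B =====
-- every list index B takes is in range, so pyGetD's default is never read
def orbit_start_indices_alt (time : List Int) (step : Int) : List Int × List Int :=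
  let starts : List Int :=
    (if time = [] then [] else [(0 : Int)]) ++
    (PySem.List.pyRange 1 (time.length : Int) 1).filter
      (fun i => PySem.List.pyGetD time i 0 - PySem.List.pyGetD time (i - 1) 0 > step)
  let lengths : List Int :=
    (PySem.List.pyRange 0 ((starts.length : Int) - 1) 1).map
      (fun j => PySem.List.pyGetD time (PySem.List.pyGetD starts (j + 1) 0 - 1) 0 -
                PySem.List.pyGetD time (PySem.List.pyGetD starts j 0) 0)
  (starts, lengths)

-- ===== PRECONDITION & SPEC =====
def Spec_orbit_start_indices (time : List Int) (step : Int) (out : List Int × List Int) : Prop := out = orbit_start_indices_alt time step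
instance (time : List Int) (step : Int) (out : List Int × List Int) : Decidable (Spec_orbit_start_indices time step out) := by unfold Spec_orbit_start_indices; infer_instance

-- ===== CLAIM (what is proved, stated in full; the proofs are below) =====
def Claim_equal_orbit_start_indices : Prop := ∀ (time : List Int) (step : Int), Dom_orbit_start_indices time step → Spec_orbit_start_indices time step (orbit_start_indices time step)

-- ===== LEMMAS AND PROOFS =====

-- B's start list over the length-n prefix bound
def pvS (time : List Int) (step : Int) (n : Nat) : List Int :=
  (if n = 0 then [] else [(0 : Int)]) ++
  (PySem.List.pyRange 1 (n : Int) 1).filter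
    (fun i => PySem.List.pyGetD time i 0 - PySem.List.pyGetD time (i - 1) 0 > step)

-- B's length list derived from a start list
def pvL (time : List Int) (ys : List Int) : List Int :=
  (PySem.List.pyRange 0 ((ys.length : Int) - 1) 1).map
    (fun j => PySem.List.pyGetD time (PySem.List.pyGetD ys (j + 1) 0 - 1) 0 -
              PySem.List.pyGetD time (PySem.List.pyGetD ys j 0) 0)

lemma pvGetD_neg_one {xs : List Int} (h : xs ≠ []) (d : Int) :
    PySem.List.pyGetD xs (-1) d = xs.getLast h := by
  have h1 : 1 ≤ xs.length := List.length_pos_iff.mpr h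
  simp [PySem.List.pyGetD, PySem.List.pyGet?, PySem.List.pyIdx?, h1]
  rw [List.getLast_eq_getElem, List.getElem?_eq_getElem (by omega)]
  simp

lemma pvGetD_append_last (ys : List Int) (i d : Int) :
    PySem.List.pyGetD (ys ++ [i]) ((ys.length : Int)) d = i := by
  have h0 : (0 : Int) ≤ (ys.length : Int) := by positivity
  have h1 : ((ys.length : Int)) < ((ys ++ [i]).length : Int) := by simp
  rw [PySem.List.pyGetD_eq_getElem _ d h0 h1]
  simp

lemma pvGetD_append_left (ys : List Int) (i d : Int) {j : Int}
    (h0 : 0 ≤ j) (h1 : j < (ys.length : Int)) :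
    PySem.List.pyGetD (ys ++ [i]) j d = PySem.List.pyGetD ys j d := by
  have h1' : j < ((ys ++ [i]).length : Int) := by simp; omega
  rw [PySem.List.pyGetD_eq_getElem _ d h0 h1', PySem.List.pyGetD_eq_getElem _ d h0 h1]
  rw [List.getElem_append_left]

lemma pvL_append (time : List Int) (ys : List Int) (i : Int) (h : ys ≠ []) :
    pvL time (ys ++ [i]) =
      pvL time ys ++ [PySem.List.pyGetD time (i - 1) 0 -
                      PySem.List.pyGetD time (ys.getLast h) 0] := by
  have hlen : (0 : Int) < (ys.length : Int) := by
    exact_mod_cast List.length_pos_iff.mpr h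
  unfold pvL
  have hL : (((ys ++ [i]).length : Int) - 1) = (ys.length : Int) := by simp
  rw [hL]
  rw [PySem.List.pyRange_one_append 0 ((ys.length : Int) - 1) (ys.length : Int) (by omega) (by omega)]
  rw [List.map_append]
  congr 1
  · apply List.map_congr_left
    intro j hj
    rw [PySem.List.mem_pyRange_one] at hj
    rw [pvGetD_append_left ys i 0 (by omega) (by omega),
        pvGetD_append_left ys i 0 hj.1 (by omega)]
  · have hsing : PySem.List.pyRange ((ys.length : Int) - 1) (ys.length : Int) 1
        = [(ys.length : Int) - 1] := by
      have := PySem.List.pyRange_one_singleton ((ys.length : Int) - 1)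
      rwa [sub_add_cancel] at this
    rw [hsing]
    simp only [List.map_cons, List.map_nil]
    have e1 : ((ys.length : Int) - 1) + 1 = (ys.length : Int) := by omega
    rw [e1, pvGetD_append_last]
    rw [pvGetD_append_left ys i 0 (by omega) (by omega)]
    have : PySem.List.pyGetD ys ((ys.length : Int) - 1) 0 = ys.getLast h := by
      rw [PySem.List.pyGetD_eq_getElem ys 0 (by omega) (by omega), List.getLast_eq_getElem]
      congr 1
      omega
    rw [this]

lemma pvS_ne_nil (time : List Int) (step : Int) {n : Nat} (h : n ≠ 0) :
    pvS time step n ≠ [] := by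
  unfold pvS
  simp [h]

lemma pvS_getLast_eq (time : List Int) (step : Int) {n : Nat} (h : pvS time step n ≠ []) :
    PySem.List.pyGetD (pvS time step n) (-1) 0 = (pvS time step n).getLast h :=
  pvGetD_neg_one h 0

lemma pvFold_eq (time : List Int) (step : Int) (n : Nat) :
    (PySem.List.pyRange 0 (n : Int) 1).foldl
      (fun (st : List Int × List Int) (i : Int) =>
        if i = 0 then (st.1 ++ [i], st.2)
        else if PySem.List.pyGetD time i 0 - PySem.List.pyGetD time (i - 1) 0 > step then
          (st.1 ++ [i],
           st.2 ++ [PySem.List.pyGetD time (i - 1) 0 -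
                    PySem.List.pyGetD time (PySem.List.pyGetD st.1 (-1) 0) 0])
        else st)
      ([], [])
    = (pvS time step n, pvL time (pvS time step n)) := by
  induction n with
  | zero =>
      simp [PySem.List.pyRange_one_eq_nil (by norm_num : (0:Int) ≤ 0), pvS, pvL,
            PySem.List.pyRange_one_eq_nil]
  | succ n ih =>
      have hcast : ((n + 1 : Nat) : Int) = (n : Int) + 1 := by push_cast; ring
      rw [hcast, PySem.List.pyRange_one_succ_right (by positivity), List.foldl_append, ih]
      simp only [List.foldl_cons, List.foldl_nil]
      by_cases hn : n = 0
      · subst hn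
        simp [pvS, pvL, PySem.List.pyRange_one_eq_nil]
      · have hne : ((n : Int)) ≠ 0 := by exact_mod_cast hn
        have h1n : (1 : Int) ≤ (n : Int) := by
          have : 1 ≤ n := Nat.one_le_iff_ne_zero.mpr hn
          exact_mod_cast this
        have hnenil := pvS_ne_nil time step hn
        by_cases hc : PySem.List.pyGetD time (n : Int) 0 - PySem.List.pyGetD time ((n : Int) - 1) 0 > step
        · have hS1 : pvS time step (n + 1) = pvS time step n ++ [(n : Int)] := by
            unfold pvS
            rw [hcast, PySem.List.pyRange_one_succ_right h1n, List.filter_append]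
            simp only [List.filter_cons, List.filter_nil, hn, if_neg (by omega : ¬ n + 1 = 0)]
            rw [if_pos (decide_eq_true hc)]
            simp
          rw [if_neg hne, if_pos hc, hS1]
          rw [pvL_append time _ (n : Int) hnenil]
          rw [pvS_getLast_eq time step hnenil]
        · have hS1 : pvS time step (n + 1) = pvS time step n := by
            unfold pvS
            rw [hcast, PySem.List.pyRange_one_succ_right h1n, List.filter_append]
            simp only [List.filter_cons, List.filter_nil, if_neg (by omega : ¬ n + 1 = 0)]
            rw [if_neg (by simpa using hc)]
            simp [hn]
          rw [if_neg hne, if_neg hc, hS1]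

lemma pvAlt_eq (time : List Int) (step : Int) :
    orbit_start_indices_alt time step =
      (pvS time step time.length, pvL time (pvS time step time.length)) := by
  unfold orbit_start_indices_alt pvS pvL
  have : (if time = [] then ([] : List Int) else [(0 : Int)]) =
         (if time.length = 0 then ([] : List Int) else [(0 : Int)]) := by
    cases time <;> simp
  rw [this]

-- ===== VERDICT (by name: the statement is the Claim_ definition above) =====
theorem orbit_start_indices_spec : Claim_equal_orbit_start_indices := by
  intro time step _
  unfold Spec_orbit_start_indices
  rw [pvAlt_eq]
  exact pvFold_eq time step time.length
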